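-- pv_equiv track=rewrite | github.com/CopticScriptorium/coptic-nlp | lib/stacked_tokenizer.py | protect_seps
-- ===== SOURCE A (Python) =====
-- def protect_seps(t):
-- 	o = ""
-- 	seps = ["|","-"]
-- 	reps = ["@@@","$$$"]
-- 	textmode = True
-- 	for c in t:
-- 		if c == "<":
-- 			textmode = False
-- 		elif c ==">":
-- 			textmode = True
-- 		if not textmode and c in seps:
-- 			o = "".join([o,reps[seps.index(c)]])
-- 		else:
-- 			o = "".join([o,c])
-- 	return o
-- ===== SOURCE B (Python) =====
-- def protect_seps(t):
--     # Jump between '<'-regions with find() and fix whole regions at once,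
--     # instead of A's per-character state machine with quadratic string appends.
--     out = []
--     s = t
--     while True:
--         j = s.find("<")
--         if j == -1:
--             out.append(s)
--             break
--         k = s.find(">", j + 1)
--         if k == -1:
--             k = len(s)
--         out.append(s[: j + 1])
--         out.append("".join("@@@" if c == "|" else "$$$" if c == "-" else c for c in s[j + 1 : k]))
--         s = s[k:]
--     return "".join(out)
-- ===== Notes on version B (the rewrite author's own statement) =====
-- stated objective: faster
-- what changed: B uses find() to jump straight to each tag opener and to the end of the tag, rewrites each whole tag region in bulk, and joins the collected pieces once, replacing A's per-character boolean state machine that rebuilds the entire output string on every character.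
import Mathlib
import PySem

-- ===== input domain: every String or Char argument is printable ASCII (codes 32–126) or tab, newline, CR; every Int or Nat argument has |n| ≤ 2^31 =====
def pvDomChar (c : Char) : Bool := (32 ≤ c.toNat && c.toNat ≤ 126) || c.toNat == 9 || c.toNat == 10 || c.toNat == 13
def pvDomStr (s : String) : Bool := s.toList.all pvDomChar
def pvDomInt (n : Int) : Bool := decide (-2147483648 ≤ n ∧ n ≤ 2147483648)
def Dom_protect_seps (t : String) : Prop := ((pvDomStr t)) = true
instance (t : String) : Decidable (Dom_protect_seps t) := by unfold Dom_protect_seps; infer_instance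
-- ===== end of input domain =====

-- B locates each tag opener with find(), rewrites the whole tag region in bulk and joins once (linear),
-- instead of A's per-character boolean state machine with a string append per character (objective: faster).

-- ===== PORT A =====
-- loop body of A: update textmode on '<'/'>', then append the (possibly replaced) character
def pvStepA (st : List Char × Bool) (c : Char) : List Char × Bool :=
  let seps : List Char := ['|', '-']
  let reps : List (List Char) := [['@','@','@'], ['$','$','$']]
  let textmode := if c = '<' then false else if c = '>' then true else st.2
  if textmode = false ∧ c ∈ seps then
    (st.1 ++ reps.getD ((PySem.List.index? seps c).getD 0) [], textmode)
  else
    (st.1 ++ [c], textmode)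

def protect_seps (t : String) : String :=
  String.mk (t.toList.foldl pvStepA ([], true)).1

-- ===== PORT B =====
-- '@@@' if c == '|' else '$$$' if c == '-' else c   (the conditional inside Source B's join)
def pvReplChar (c : Char) : List Char :=
  if c = '|' then ['@','@','@'] else if c = '-' then ['$','$','$'] else [c]

-- facts the recursion in pvGoB needs for termination (stated before the port, cited by name)
theorem pv_find_facts (s : List Char) (c : Char) (h : PySem.Chars.find s [c] ≠ -1) :
    0 ≤ PySem.Chars.find s [c] ∧ (PySem.Chars.find s [c]).toNat < s.length ∧
      s[(PySem.Chars.find s [c]).toNat]? = some c ∧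
      ∀ i : Nat, i < (PySem.Chars.find s [c]).toNat → s[i]? ≠ some c := by
  have hspec := PySem.Chars.findFrom_natCast_spec s [c] 0 (Nat.zero_le _)
  simp only [Nat.cast_zero, PySem.Chars.findFrom_zero] at hspec
  obtain ⟨h0, hpre, hmin⟩ := hspec h
  obtain ⟨u, hu⟩ := hpre
  have hget : s[(PySem.Chars.find s [c]).toNat]? = some c := by
    have h2 : (s.drop (PySem.Chars.find s [c]).toNat)[0]? = some c := by
      rw [← hu]; rfl
    simpa only [List.getElem?_drop, Nat.add_zero] using h2
  refine ⟨h0, ?_, hget, ?_⟩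
  · exact (List.getElem?_eq_some_iff.mp hget).1
  · intro i hi hsome
    obtain ⟨hlt, hv⟩ := List.getElem?_eq_some_iff.mp hsome
    refine hmin i (Nat.zero_le _) hi ⟨s.drop (i + 1), ?_⟩
    rw [List.drop_eq_getElem_cons hlt, hv]
    rfl

theorem pv_goB_dec (s : List Char) (h : PySem.Chars.find s ['<'] ≠ -1) (k : Int)
    (hk : k = (if PySem.Chars.findFrom s ['>'] (PySem.Chars.find s ['<'] + 1) none = -1
               then (s.length : Int)
               else PySem.Chars.findFrom s ['>'] (PySem.Chars.find s ['<'] + 1) none)) :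
    (PySem.List.slice s (some k) none).length < s.length := by
  obtain ⟨h0, hlt, -, -⟩ := pv_find_facts s '<' h
  have h1 : 1 ≤ k := by
    rw [hk]
    split_ifs with hf
    · omega
    · have hcast : PySem.Chars.find s ['<'] + 1 = (((PySem.Chars.find s ['<']).toNat + 1 : Nat) : Int) := by
        omega
      rw [hcast] at hf ⊢
      have := (PySem.Chars.findFrom_natCast_spec s ['>'] ((PySem.Chars.find s ['<']).toNat + 1)
        (by omega) hf).1
      omega
  rw [PySem.List.slice_from s (by omega : (0:Int) ≤ k)]
  simp only [List.length_drop]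
  omega

-- "k = s.find('>', j + 1); if k == -1: k = len(s)"  (j = s.find('<'))
def pvK (s : List Char) : Int :=
  if PySem.Chars.findFrom s ['>'] (PySem.Chars.find s ['<'] + 1) none = -1
  then (s.length : Int)
  else PySem.Chars.findFrom s ['>'] (PySem.Chars.find s ['<'] + 1) none

-- the while-loop of Source B as recursion on the remaining string s
def pvGoB (s : List Char) : List Char :=
  if hj : PySem.Chars.find s ['<'] = -1 then s
  else
    PySem.List.slice s none (some (PySem.Chars.find s ['<'] + 1)) ++
      PySem.Chars.join []
        ((PySem.List.slice s (some (PySem.Chars.find s ['<'] + 1)) (some (pvK s))).map pvReplChar) ++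
      pvGoB (PySem.List.slice s (some (pvK s)) none)
termination_by s.length
decreasing_by exact pv_goB_dec s hj (pvK s) rfl

def protect_seps_alt (t : String) : String :=
  String.mk (pvGoB t.toList)

-- ===== PRECONDITION & SPEC =====
def Spec_protect_seps (t : String) (out : String) : Prop := out = protect_seps_alt t
instance (t : String) (out : String) : Decidable (Spec_protect_seps t out) := by unfold Spec_protect_seps; infer_instance

-- ===== CLAIM (what is proved, stated in full; the proofs are below) =====
def Claim_equal_protect_seps : Prop := ∀ (t : String), Dom_protect_seps t → Spec_protect_seps t (protect_seps t)

-- ===== LEMMAS AND PROOFS =====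

theorem pv_join_nil_flatten (ps : List (List Char)) :
    PySem.Chars.join [] ps = ps.flatten := by
  show List.intercalate [] ps = ps.flatten
  simp only [List.intercalate]
  induction ps with
  | nil => rfl
  | cons h t ih => cases t <;> simp_all [List.intersperse]

theorem pv_find_eq_neg (s : List Char) (c : Char) (h : c ∉ s) :
    PySem.Chars.find s [c] = -1 := by
  rw [PySem.Chars.find_eq_neg_one_iff, List.singleton_infix_iff]; exact h

theorem pv_find_eq_length (a b : List Char) (c : Char) (ha : c ∉ a) :
    PySem.Chars.find (a ++ c :: b) [c] = (a.length : Int) := by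
  have hne : PySem.Chars.find (a ++ c :: b) [c] ≠ -1 := by
    rw [Ne, PySem.Chars.find_eq_neg_one_iff, List.singleton_infix_iff]
    simp
  obtain ⟨h0, hlt, hget, hmin⟩ := pv_find_facts (a ++ c :: b) c hne
  set j := (PySem.Chars.find (a ++ c :: b) [c]).toNat with hjdef
  rcases lt_trichotomy j a.length with hcase | hcase | hcase
  · exfalso
    rw [List.getElem?_append_left hcase] at hget
    exact ha (List.mem_of_getElem? hget)
  · omega
  · exfalso
    refine hmin a.length hcase ?_
    rw [List.getElem?_append_right (le_refl _)]
    simp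
-- takeWhile/dropWhile decomposition at the first occurrence of c
theorem pv_dropWhile_head (p : Char → Bool) (s : List Char) (hd : Char) (tl : List Char)
    (heq : s.dropWhile p = hd :: tl) : p hd = false := by
  induction s with
  | nil => simp at heq
  | cons x xs ih =>
    rw [List.dropWhile_cons] at heq
    by_cases hpx : p x
    · exact ih (by simpa [hpx] using heq)
    · simp [hpx] at heq
      obtain ⟨h1, -⟩ := heq
      rw [← h1]
      simpa using hpx

theorem pv_split_at_mem (s : List Char) (c : Char) (h : c ∈ s) :
    s = s.takeWhile (· ≠ c) ++ c :: (s.dropWhile (· ≠ c)).tail ∧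
      c ∉ s.takeWhile (· ≠ c) ∧
      s.dropWhile (· ≠ c) = c :: (s.dropWhile (· ≠ c)).tail := by
  have hne : s.dropWhile (· ≠ c) ≠ [] := by
    intro hnil
    have := List.dropWhile_eq_nil_iff.mp hnil c h
    simp at this
  obtain ⟨hd, tl, heq⟩ := List.exists_cons_of_ne_nil hne
  have hhd : hd = c := by
    have h2 := pv_dropWhile_head (fun x => decide (x ≠ c)) s hd tl heq
    simpa using h2
  have hdw : s.dropWhile (· ≠ c) = c :: (s.dropWhile (· ≠ c)).tail := by
    rw [heq]
    simp [hhd]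
  refine ⟨?_, ?_, hdw⟩
  · conv_lhs => rw [← List.takeWhile_append_dropWhile (p := fun x => decide (x ≠ c)) (l := s)]
    exact congrArg _ hdw
  · intro hmem
    have := List.mem_takeWhile_imp hmem
    simp at this

theorem pv_goB_no_tag (s : List Char) (h : '<' ∉ s) : pvGoB s = s := by
  rw [pvGoB, dif_pos (pv_find_eq_neg s '<' h)]

theorem pv_goB_tag (a b : List Char) (ha : '<' ∉ a) :
    pvGoB (a ++ '<' :: b) =
      a ++ '<' :: (((b.takeWhile (· ≠ '>')).map pvReplChar).flatten ++
        pvGoB (b.dropWhile (· ≠ '>'))) := by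
  have hj : PySem.Chars.find (a ++ '<' :: b) ['<'] = (a.length : Int) :=
    pv_find_eq_length a b '<' ha
  have hjne : PySem.Chars.find (a ++ '<' :: b) ['<'] ≠ -1 := by omega
  have hlen : (a ++ '<' :: b).length = a.length + 1 + b.length := by simp; omega
  have hdropj : (a ++ '<' :: b).drop (a.length + 1) = b := by
    rw [show a ++ '<' :: b = (a ++ ['<']) ++ b by simp,
        List.drop_left' (by simp)]
  have hcast : PySem.Chars.find (a ++ '<' :: b) ['<'] + 1 = ((a.length + 1 : Nat) : Int) := by
    rw [hj]; push_cast; ring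
  have hff : PySem.Chars.findFrom (a ++ '<' :: b) ['>'] (PySem.Chars.find (a ++ '<' :: b) ['<'] + 1) none
      = if PySem.Chars.find b ['>'] = -1 then -1 else ((a.length + 1 : Nat) : Int) + PySem.Chars.find b ['>'] := by
    rw [hcast, PySem.Chars.findFrom_natCast _ _ _ (by omega), hdropj]
  have htake : PySem.List.slice (a ++ '<' :: b) none (some (PySem.Chars.find (a ++ '<' :: b) ['<'] + 1))
      = a ++ ['<'] := by
    rw [hcast, PySem.List.slice_to _ (by positivity), Int.toNat_natCast,
        show a ++ '<' :: b = (a ++ ['<']) ++ b by simp,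
        List.take_left' (by simp)]
  rw [pvGoB, dif_neg hjne]
  by_cases hmem : '>' ∈ b
  · obtain ⟨hsplit, hnotin, hdw⟩ := pv_split_at_mem b '>' hmem
    set u := b.takeWhile (· ≠ '>') with hu
    set v := (b.dropWhile (· ≠ '>')).tail with hv
    have hfb : PySem.Chars.find b ['>'] = (u.length : Int) := by
      conv_lhs => rw [hsplit]
      exact pv_find_eq_length u v '>' hnotin
    have hfbne : ¬ PySem.Chars.find b ['>'] = -1 := by omega
    have hk : pvK (a ++ '<' :: b) = ((a.length + 1 + u.length : Nat) : Int) := by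
      unfold pvK
      rw [hff, if_neg hfbne, hfb, if_neg (by omega)]
      push_cast; ring
    have hmid : PySem.List.slice (a ++ '<' :: b) (some (PySem.Chars.find (a ++ '<' :: b) ['<'] + 1))
        (some (pvK (a ++ '<' :: b))) = u := by
      rw [hcast, hk, PySem.List.slice_natCast]
      rw [show a.length + 1 + u.length - (a.length + 1) = u.length by omega, hdropj]
      conv_lhs => rw [hsplit]
      rw [List.take_left' rfl]
    have hrest : PySem.List.slice (a ++ '<' :: b) (some (pvK (a ++ '<' :: b))) none
        = '>' :: v := by
      rw [hk, PySem.List.slice_from _ (by positivity), Int.toNat_natCast,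
          show a.length + 1 + u.length = (a.length + 1) + u.length by ring,
          ← List.drop_drop, hdropj]
      conv_lhs => rw [hsplit]
      rw [List.drop_left' rfl]
    rw [htake, hmid, hrest, pv_join_nil_flatten, ← hdw]
    simp
  · have hfb : PySem.Chars.find b ['>'] = -1 := pv_find_eq_neg b '>' hmem
    have hk : pvK (a ++ '<' :: b) = ((a.length + 1 + b.length : Nat) : Int) := by
      unfold pvK
      rw [hff, if_pos hfb, if_pos rfl, hlen]
    have hmid : PySem.List.slice (a ++ '<' :: b) (some (PySem.Chars.find (a ++ '<' :: b) ['<'] + 1))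
        (some (pvK (a ++ '<' :: b))) = b := by
      rw [hcast, hk, PySem.List.slice_natCast, hdropj,
          show a.length + 1 + b.length - (a.length + 1) = b.length by omega, List.take_length]
    have hrest : PySem.List.slice (a ++ '<' :: b) (some (pvK (a ++ '<' :: b))) none = [] := by
      rw [hk, PySem.List.slice_from _ (by positivity), Int.toNat_natCast, ← hlen, List.drop_length]
    have htw : b.takeWhile (· ≠ '>') = b :=
      List.takeWhile_eq_self_iff.mpr (by
        intro x hx
        simp only [ne_eq, decide_eq_true_eq]
        intro heq; exact hmem (heq ▸ hx))
    have hdw : b.dropWhile (· ≠ '>') = [] :=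
      List.dropWhile_eq_nil_iff.mpr (by
        intro x hx
        simp only [ne_eq, decide_eq_true_eq]
        intro heq; exact hmem (heq ▸ hx))
    rw [htake, hmid, hrest, pv_join_nil_flatten, htw, hdw, pv_goB_no_tag [] (by simp)]
    simp

theorem pv_goB_cons (c : Char) (s : List Char) (hc : c ≠ '<') :
    pvGoB (c :: s) = c :: pvGoB s := by
  by_cases h : '<' ∈ s
  · obtain ⟨hsplit, hnotin, -⟩ := pv_split_at_mem s '<' h
    conv_lhs => rw [hsplit, ← List.cons_append]
    conv_rhs => rw [hsplit]
    rw [pv_goB_tag _ _ (by simp only [List.mem_cons, not_or]; exact ⟨Ne.symm hc, by simpa using hnotin⟩),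
        pv_goB_tag _ _ hnotin]
    simp
  · rw [pv_goB_no_tag s h, pv_goB_no_tag (c :: s) (by simp [h, Ne.symm hc])]

-- A's loop-body on the four relevant shapes of input character
theorem pv_stepA_true (acc : List Char) (c : Char) (hc : c ≠ '<') :
    pvStepA (acc, true) c = (acc ++ [c], true) := by
  by_cases h : c = '>' <;> simp [pvStepA, hc, h]
theorem pv_stepA_open (acc : List Char) :
    pvStepA (acc, true) '<' = (acc ++ ['<'], false) := by simp [pvStepA]
theorem pv_stepA_close (acc : List Char) :
    pvStepA (acc, false) '>' = (acc ++ ['>'], true) := by simp [pvStepA]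
theorem pv_stepA_false (acc : List Char) (c : Char) (hc : c ≠ '>') :
    pvStepA (acc, false) c = (acc ++ pvReplChar c, false) := by
  by_cases h1 : c = '|'
  · subst h1
    rfl
  · by_cases h2 : c = '-'
    · subst h2
      rfl
    · by_cases h3 : c = '<' <;> simp [pvStepA, pvReplChar, hc, h1, h2, h3]

-- the loop of A computes B's output, in both textmode states
theorem pv_run (s : List Char) : ∀ acc : List Char,
    (s.foldl pvStepA (acc, true)).1 = acc ++ pvGoB s ∧
    (s.foldl pvStepA (acc, false)).1 =
      acc ++ ((s.takeWhile (· ≠ '>')).map pvReplChar).flatten ++ pvGoB (s.dropWhile (· ≠ '>')) := by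
  induction s with
  | nil => intro acc; simp [pv_goB_no_tag [] (by simp)]
  | cons c s ih =>
    intro acc
    constructor
    · by_cases hc : c = '<'
      · subst hc
        rw [List.foldl_cons, pv_stepA_open, (ih _).2]
        have htag := pv_goB_tag [] s (by simp)
        simp only [List.nil_append] at htag
        rw [htag]
        simp
      · rw [List.foldl_cons, pv_stepA_true acc c hc, (ih _).1, pv_goB_cons c s hc]
        simp
    · by_cases hc : c = '>'
      · subst hc
        rw [List.foldl_cons, pv_stepA_close, (ih _).1, List.takeWhile_cons, List.dropWhile_cons]
        simp [pv_goB_cons '>' s (by decide)]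
      · rw [List.foldl_cons, pv_stepA_false acc c hc, (ih _).2]
        have htw : (c :: s).takeWhile (· ≠ '>') = c :: s.takeWhile (· ≠ '>') := by
          simp [hc]
        have hdw : (c :: s).dropWhile (· ≠ '>') = s.dropWhile (· ≠ '>') := by
          simp [hc]
        rw [htw, hdw]
        simp

-- ===== VERDICT (by name: the statement is the Claim_ definition above) =====
theorem protect_seps_spec : Claim_equal_protect_seps := by
  intro t _
  unfold Spec_protect_seps protect_seps protect_seps_alt
  rw [(pv_run t.toList []).1]
  rfl
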